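-- pv_equiv track=rewrite | github.com/nguyenvantu11052002/Python-PTIT | ICPC0114 - PERFECT PRIME.py | check
-- ===== SOURCE A (Python) =====
-- import math
--
-- def nto (n) :
--     if n < 2: return False
--     for i in range (2, int(math.sqrt(n)) + 1) :
--         if n % i == 0 :
--             return False
--     return True
--
-- def check (n) :
--     if nto(n) == False: return False
--     tong = 0
--     m = 0
--     while n != 0:
--         d = n % 10
--         if nto(d) == False:
--             return False
--         tong += d
--         m = m * 10 + d
--         n = int(n/10)
--     if nto(m) == False or nto(tong) == False :
--         return False
--     return True
-- ===== SOURCE B (Python) =====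
-- def prime(n):
--     if n < 2:
--         return False
--     if n % 2 == 0:
--         return n == 2
--     i = 3
--     while i * i <= n:
--         if n % i == 0:
--             return False
--         i += 2
--     return True
--
-- def digits(n):
--     return [n % 10] if n < 10 else [n % 10] + digits(n // 10)
--
-- def check(n):
--     if n < 2:
--         return False
--     ds = digits(n)
--     if any(d not in (2, 3, 5, 7) for d in ds):
--         return False
--     rev = 0
--     for d in ds:
--         rev = rev * 10 + d
--     return prime(n) and prime(rev) and prime(sum(ds))
-- ===== Notes on version B (the rewrite author's own statement) =====
-- stated objective: alternative
-- what changed: A runs trial division on every digit inside one fused arithmetic stripping loop with early returns; B builds the digit list with a recursive helper, rejects any digit outside the four-element set of one-digit primes by a membership test with no per-digit trial division at all, and tests primality of n, the reversal and the digit sum with an odd-only trial-division test that special-cases even numbers.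
import Mathlib
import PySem

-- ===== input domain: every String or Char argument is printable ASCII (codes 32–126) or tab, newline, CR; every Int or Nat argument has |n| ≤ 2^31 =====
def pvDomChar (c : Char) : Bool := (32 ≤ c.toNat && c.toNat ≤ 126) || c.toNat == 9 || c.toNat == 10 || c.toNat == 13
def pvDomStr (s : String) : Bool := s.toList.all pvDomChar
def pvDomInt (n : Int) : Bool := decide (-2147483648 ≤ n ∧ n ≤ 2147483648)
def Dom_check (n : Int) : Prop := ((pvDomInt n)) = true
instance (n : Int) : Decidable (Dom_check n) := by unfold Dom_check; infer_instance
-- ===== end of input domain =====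

-- B replaces A's per-digit trial division inside one fused stripping loop by a digit-set
-- membership test (a digit is prime iff it is 2, 3, 5 or 7), a recursive digit-list builder,
-- and an odd-only trial-division primality test with an even special case; same cost.

-- ===== PORT A =====
-- for-loop of nto with early 'return False' (range computed once, scanned until a divisor hits)
def ntoGo (n : Int) : List Int → Bool
  | [] => true
  | i :: rest => if PySem.Int.mod n i == 0 then false else ntoGo n rest

-- int(math.sqrt(n)) ported as Nat.sqrt: exact for 0 ≤ n ≤ 2^31 (float sqrt is correctly
-- rounded and the gap to the neighbouring integer dwarfs one ulp at this magnitude);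
-- math.sqrt is only reached when 2 ≤ n.
def nto (n : Int) : Bool :=
  if n < 2 then false
  else ntoGo n (PySem.List.pyRange 2 ((Nat.sqrt n.toNat : Int) + 1) 1)

-- the 'while n != 0' loop of A, carrying tong and m; 'int(n/10)' is truncdiv
def checkLoop (n tong m : Int) : Bool :=
  if n = 0 then
    if nto m = false || nto tong = false then false else true
  else
    let d := PySem.Int.mod n 10
    if nto d = false then false
    else checkLoop (PySem.Int.truncdiv n 10) (tong + d) (m * 10 + d)
termination_by n.natAbs
decreasing_by
  simp only [PySem.Int.truncdiv]
  have : (Int.tdiv n 10).natAbs = n.natAbs / 10 := by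
    rw [Int.natAbs_tdiv]
    rfl
  omega

def check (n : Int) : Bool :=
  if nto n = false then false else checkLoop n 0 0

-- ===== PORT B =====
-- 'while i * i <= n: if n % i == 0: return False; i += 2' of B's prime
def primeLoop (n i : Int) : Bool :=
  if i * i ≤ n then
    if PySem.Int.mod n i == 0 then false else primeLoop n (i + 2)
  else true
termination_by (n + 1 - i).toNat
decreasing_by
  have h0 : 0 ≤ i * i := mul_self_nonneg i
  have h2 : i ≤ 0 ∨ i ≤ i * i := by
    rcases le_or_gt i 0 with h' | h'
    · exact Or.inl h'
    · exact Or.inr (le_mul_of_one_le_left (by omega) (by omega))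
  omega

-- B's prime: even special case, then odd-only trial division from 3
def prime (n : Int) : Bool :=
  if n < 2 then false
  else if PySem.Int.mod n 2 == 0 then n == 2
  else primeLoop n 3

-- '[n % 10] if n < 10 else [n % 10] + digits(n // 10)'
def digitsB (n : Int) : List Int :=
  if n < 10 then [PySem.Int.mod n 10]
  else PySem.Int.mod n 10 :: digitsB (PySem.Int.floordiv n 10)
termination_by n.toNat
decreasing_by
  have : PySem.Int.floordiv n 10 = n / 10 := PySem.Int.floordiv_eq_ediv_of_pos (by omega)
  omega

def check_alt (n : Int) : Bool :=
  if n < 2 then false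
  else
    let ds := digitsB n
    if ds.any (fun d => !(d == 2 || d == 3 || d == 5 || d == 7)) then false
    else
      let rev := ds.foldl (fun r d => r * 10 + d) 0
      prime n && (prime rev && prime ds.sum)

-- ===== PRECONDITION & SPEC =====
def Spec_check (n : Int) (out : Bool) : Prop := out = check_alt n
instance (n : Int) (out : Bool) : Decidable (Spec_check n out) := by unfold Spec_check; infer_instance

-- ===== CLAIM (what is proved, stated in full; the proofs are below) =====
def Claim_equal_check : Prop := ∀ (n : Int), Dom_check n → Spec_check n (check n)

-- ===== LEMMAS AND PROOFS =====

-- the digits of n, least significant first (proof-side characterisation of the loops)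
def digN (n : Nat) : List Int :=
  if n = 0 then [] else ((n % 10 : Nat) : Int) :: digN (n / 10)
termination_by n
decreasing_by omega

lemma ntoGo_eq_all (n : Int) (l : List Int) :
    ntoGo n l = l.all (fun i => !(PySem.Int.mod n i == 0)) := by
  induction l with
  | nil => rfl
  | cons i rest ih =>
    simp only [ntoGo, List.all_cons, ← ih]
    by_cases h : PySem.Int.mod n i == 0 <;> simp [h]

-- A's test is primality (trial division up to the integer square root)
lemma nto_iff (n : Int) : nto n = true ↔ 2 ≤ n ∧ Nat.Prime n.toNat := by
  unfold nto
  by_cases h : n < 2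
  · simp only [if_pos h, Bool.false_eq_true, false_iff]
    rintro ⟨h2, -⟩; omega
  · rw [if_neg h]
    replace h : 2 ≤ n := by omega
    have hcast : n = ((n.toNat : Nat) : Int) := by omega
    rw [ntoGo_eq_all, List.all_eq_true]
    constructor
    · intro hall
      refine ⟨h, ?_⟩
      rw [Nat.prime_def_le_sqrt]
      refine ⟨by omega, fun m hm hle hdvd => ?_⟩
      have hmem : ((m : Nat) : Int) ∈ PySem.List.pyRange 2 ((Nat.sqrt n.toNat : Int) + 1) 1 := by
        rw [PySem.List.mem_pyRange_one]
        constructor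
        · exact_mod_cast hm
        · omega
      have hx := hall _ hmem
      simp only [Bool.not_eq_eq_eq_not, Bool.not_true, beq_eq_false_iff_ne, ne_eq,
        PySem.Int.mod_eq_zero_iff_dvd] at hx
      exact hx (by rw [hcast]; exact_mod_cast hdvd)
    · rintro ⟨-, hp⟩ i hi
      rw [PySem.List.mem_pyRange_one] at hi
      simp only [Bool.not_eq_eq_eq_not, Bool.not_true, beq_eq_false_iff_ne, ne_eq,
        PySem.Int.mod_eq_zero_iff_dvd]
      intro hdvd
      have hnd : i.toNat ∣ n.toNat := by
        have : ((i.toNat : Nat) : Int) ∣ ((n.toNat : Nat) : Int) := by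
          rw [← hcast, show ((i.toNat : Nat) : Int) = i by omega]; exact hdvd
        exact_mod_cast this
      exact (Nat.prime_def_le_sqrt.1 hp).2 i.toNat (by omega)
        (by omega) hnd

-- B's loop: no divisor d ≥ i of the same parity as i with d * d ≤ n
lemma primeLoop_iff (n : Int) : ∀ i : Int, 3 ≤ i →
    (primeLoop n i = true ↔ ∀ d : Int, i ≤ d → d % 2 = i % 2 → d * d ≤ n → ¬ d ∣ n) := by
  intro i hi
  generalize hk : (n + 1 - i).toNat = k
  induction k using Nat.strong_induction_on generalizing i with
  | _ k ih =>
    rw [primeLoop]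
    by_cases hgt : i * i ≤ n
    · rw [if_pos hgt]
      have hin : i ≤ n := le_trans (le_mul_of_one_le_left (by omega) (by omega)) hgt
      by_cases hdvd : PySem.Int.mod n i == 0
      · rw [if_pos hdvd]
        simp only [Bool.false_eq_true, false_iff, not_forall]
        refine ⟨i, le_rfl, rfl, hgt, ?_⟩
        simp only [beq_iff_eq, PySem.Int.mod_eq_zero_iff_dvd] at hdvd
        simp [hdvd]
      · rw [if_neg hdvd]
        simp only [beq_iff_eq, PySem.Int.mod_eq_zero_iff_dvd] at hdvd
        rw [ih (n + 1 - (i + 2)).toNat (by omega) (i + 2) (by omega) rfl]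
        constructor
        · intro hall d hd hpar hsq hddvd
          rcases eq_or_lt_of_le hd with heq | hlt
          · exact hdvd (heq ▸ hddvd)
          · have : i + 2 ≤ d := by omega
            exact hall d this (by omega) hsq hddvd
        · intro hall d hd hpar hsq hddvd
          exact hall d (by omega) (by omega) hsq hddvd
    · rw [if_neg hgt]
      simp only [true_iff]
      intro d hd hpar hsq hddvd
      have : i * i ≤ d * d := mul_le_mul hd hd (by omega) (by omega)
      omega

-- B's test is primality too
lemma prime_iff (n : Int) : prime n = true ↔ 2 ≤ n ∧ Nat.Prime n.toNat := by
  unfold prime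
  by_cases h2 : n < 2
  · simp only [if_pos h2, Bool.false_eq_true, false_iff]
    rintro ⟨h, -⟩; omega
  rw [if_neg h2]
  replace h2 : 2 ≤ n := by omega
  have hcast : n = ((n.toNat : Nat) : Int) := by omega
  have hmod2 : PySem.Int.mod n 2 = n % 2 := PySem.Int.mod_eq_emod_of_pos (by omega)
  by_cases hev : PySem.Int.mod n 2 == 0
  · rw [if_pos hev]
    simp only [beq_iff_eq, hmod2] at hev
    constructor
    · intro h
      simp only [beq_iff_eq] at h
      subst h
      exact ⟨by norm_num, by decide⟩
    · rintro ⟨-, hp⟩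
      have h2d : 2 ∣ n.toNat := by
        have : (2 : Int) ∣ n := by omega
        rw [hcast] at this
        exact_mod_cast this
      rcases (Nat.Prime.eq_one_or_self_of_dvd hp 2 h2d) with h | h
      · omega
      · simp only [beq_iff_eq]; omega
  · rw [if_neg hev]
    simp only [beq_iff_eq, hmod2] at hev
    have hodd : n % 2 = 1 := by omega
    have hn3 : 3 ≤ n := by omega
    rw [primeLoop_iff n 3 (by omega)]
    constructor
    · intro hall
      refine ⟨by omega, ?_⟩
      rw [Nat.prime_def_le_sqrt]
      refine ⟨by omega, fun m hm hle hdvd => ?_⟩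
      have hdInt : ((m : Nat) : Int) ∣ n := by
        rw [hcast]; exact_mod_cast hdvd
      have hsq : ((m : Nat) : Int) * ((m : Nat) : Int) ≤ n := by
        have : m * m ≤ n.toNat := Nat.le_sqrt.1 hle
        push_cast at *
        omega
      by_cases hm2 : m % 2 = 0
      · -- an even divisor would make odd n even
        have : (2 : Int) ∣ n := dvd_trans (by omega : (2:Int) ∣ ((m : Nat) : Int)) hdInt
        omega
      · have hmo : ((m : Nat) : Int) % 2 = 1 := by omega
        have hm3 : 3 ≤ ((m : Nat) : Int) := by omega
        exact hall _ hm3 (by omega) hsq hdInt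
    · rintro ⟨-, hp⟩ d hd hpar hsq hddvd
      have hdn : d.toNat ∣ n.toNat := by
        have : ((d.toNat : Nat) : Int) ∣ ((n.toNat : Nat) : Int) := by
          rw [← hcast, show ((d.toNat : Nat) : Int) = d by omega]; exact hddvd
        exact_mod_cast this
      have hsqn : d.toNat ≤ Nat.sqrt n.toNat := by
        rw [Nat.le_sqrt]
        have : ((d.toNat : Nat) : Int) * ((d.toNat : Nat) : Int) ≤ ((n.toNat : Nat) : Int) := by
          rw [← hcast, show ((d.toNat : Nat) : Int) = d by omega]; exact hsq
        exact_mod_cast this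
      exact (Nat.prime_def_le_sqrt.1 hp).2 d.toNat (by omega) hsqn hdn

lemma nto_eq_prime (n : Int) : nto n = prime n := by
  cases hp : prime n
  · cases hn : nto n
    · rfl
    · exact absurd ((prime_iff n).2 ((nto_iff n).1 hn)) (by simp [hp])
  · exact (nto_iff n).2 ((prime_iff n).1 hp)

lemma digN_bounds (k : Nat) : ∀ d ∈ digN k, 0 ≤ d ∧ d < 10 := by
  induction k using Nat.strong_induction_on with
  | _ k ih =>
    intro d hd
    rw [digN] at hd
    by_cases h : k = 0
    · simp [h] at hd
    · rw [if_neg h, List.mem_cons] at hd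
      rcases hd with h1 | h1
      · subst h1
        constructor
        · positivity
        · exact_mod_cast Nat.mod_lt k (by omega)
      · exact ih (k / 10) (by omega) d h1

-- a single digit passes A's nto exactly when it is 2, 3, 5 or 7
lemma nto_digit (d : Int) (h0 : 0 ≤ d) (h10 : d < 10) :
    nto d = (d == 2 || d == 3 || d == 5 || d == 7) := by
  have key : ∀ e : Int, nto e = decide (2 ≤ e ∧ Nat.Prime e.toNat) := by
    intro e
    cases h : nto e
    · symm
      simp only [decide_eq_false_iff_not]
      intro hc
      rw [(nto_iff e).2 hc] at h
      simp at h
    · symm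
      simp only [decide_eq_true_eq]
      exact (nto_iff e).1 h
  have : d = 0 ∨ d = 1 ∨ d = 2 ∨ d = 3 ∨ d = 4 ∨ d = 5 ∨ d = 6 ∨ d = 7 ∨ d = 8 ∨ d = 9 := by
    omega
  rcases this with h | h | h | h | h | h | h | h | h | h <;> subst h <;> rw [key] <;> decide

lemma digitsB_eq (k : Nat) (hk : 1 ≤ k) : digitsB (k : Int) = digN k := by
  induction k using Nat.strong_induction_on with
  | _ k ih =>
    rw [digitsB, digN, if_neg (by omega : ¬ k = 0)]
    have hmd : PySem.Int.mod (k : Int) 10 = ((k % 10 : Nat) : Int) := by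
      rw [PySem.Int.mod_eq_emod_of_pos (by omega)]; omega
    by_cases h : k < 10
    · have h0 : k / 10 = 0 := by omega
      rw [if_pos (by exact_mod_cast h), hmd, h0, digN]
      simp
    · have hfd : PySem.Int.floordiv (k : Int) 10 = ((k / 10 : Nat) : Int) := by
        rw [PySem.Int.floordiv_eq_ediv_of_pos (by omega)]; omega
      rw [if_neg (by exact_mod_cast h), hmd, hfd, ih (k / 10) (by omega) (by omega)]

lemma checkLoop_eq (k : Nat) : ∀ tong m : Int,
    checkLoop (k : Int) tong m =
      ((digN k).all nto &&
        (nto ((digN k).foldl (fun a d => a * 10 + d) m) && nto (tong + (digN k).sum))) := by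
  induction k using Nat.strong_induction_on with
  | _ k ih =>
    intro tong m
    by_cases h : k = 0
    · subst h
      rw [checkLoop, digN]
      norm_num
    · have hk0 : (k : Int) ≠ 0 := by exact_mod_cast h
      rw [checkLoop, if_neg hk0, digN, if_neg h]
      have hmd : PySem.Int.mod (k : Int) 10 = ((k % 10 : Nat) : Int) := by
        rw [PySem.Int.mod_eq_emod_of_pos (by omega)]; omega
      have htd : PySem.Int.truncdiv (k : Int) 10 = ((k / 10 : Nat) : Int) := by
        simp only [PySem.Int.truncdiv]
        rw [Int.tdiv_eq_ediv_of_nonneg (by positivity)]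
        omega
      rw [hmd, htd, List.all_cons, List.foldl_cons, List.sum_cons]
      by_cases hd : nto ((k % 10 : Nat) : Int) = false
      · rw [if_pos hd, hd]
        simp
      · rw [if_neg hd]
        rw [ih (k / 10) (by omega)]
        rw [Bool.not_eq_false] at hd
        rw [hd]
        have ha : tong + ((k % 10 : Nat) : Int) + (digN (k / 10)).sum
            = tong + (((k % 10 : Nat) : Int) + (digN (k / 10)).sum) := by ring
        rw [ha]
        simp

lemma all_nto_eq_all_mem (l : List Int) (hl : ∀ d ∈ l, 0 ≤ d ∧ d < 10) :
    l.all nto = l.all (fun d => d == 2 || d == 3 || d == 5 || d == 7) := by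
  induction l with
  | nil => rfl
  | cons a t ih =>
    rw [List.all_cons, List.all_cons, nto_digit a (hl a (by simp)).1 (hl a (by simp)).2,
      ih (fun d hd => hl d (by simp [hd]))]

lemma check_eq_alt (n : Int) : check n = check_alt n := by
  unfold check check_alt
  by_cases h2 : n < 2
  · have hn : nto n = false := by
      cases hf : nto n
      · rfl
      · exact absurd ((nto_iff n).1 hf).1 (by omega)
    rw [if_pos hn, if_pos h2]
  · rw [if_neg h2]
    replace h2 : 2 ≤ n := by omega
    have hds : digitsB n = digN n.toNat := by
      have := digitsB_eq n.toNat (by omega)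
      rwa [show ((n.toNat : Nat) : Int) = n by omega] at this
    have hcl : checkLoop n 0 0 =
        ((digN n.toNat).all nto &&
          (nto ((digN n.toNat).foldl (fun a d => a * 10 + d) 0) &&
            nto (0 + (digN n.toNat).sum))) := by
      have := checkLoop_eq n.toNat 0 0
      rwa [show ((n.toNat : Nat) : Int) = n by omega] at this
    have hall := all_nto_eq_all_mem (digN n.toNat) (digN_bounds n.toNat)
    rw [hds]
    by_cases hbad : (digN n.toNat).any (fun d => !(d == 2 || d == 3 || d == 5 || d == 7)) = true
    · rw [if_pos hbad]
      have hfalse : (digN n.toNat).all nto = false := by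
        rw [hall, List.all_eq_false]
        rw [List.any_eq_true] at hbad
        obtain ⟨d, hdl, hq⟩ := hbad
        exact ⟨d, hdl, by simpa using hq⟩
      by_cases hn : nto n = false
      · rw [if_pos hn]
      · rw [if_neg hn, hcl, hfalse, Bool.false_and]
    · rw [if_neg hbad]
      have htrue : (digN n.toNat).all nto = true := by
        rw [hall, List.all_eq_true]
        intro d hd
        by_contra hc
        exact hbad (List.any_eq_true.2 ⟨d, hd, by simpa using hc⟩)
      rw [hcl, htrue, Bool.true_and, zero_add]
      simp only [nto_eq_prime]
      by_cases hp : prime n = false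
      · rw [if_pos hp, hp, Bool.false_and]
      · rw [if_neg hp, show prime n = true by revert hp; cases prime n <;> simp, Bool.true_and]

-- ===== VERDICT (by name: the statement is the Claim_ definition above) =====
theorem check_spec : Claim_equal_check := by
  intro n _
  unfold Spec_check
  exact check_eq_alt n
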